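-- pv_equiv track=rewrite | github.com/WhenRecess/FFVIIRebirthAP | tools/filter_ue4ss_functions.py | format_output_categorized
-- ===== SOURCE A (Python) =====
-- from typing import List, Tuple, Set
-- from collections import defaultdict
--
-- def format_output_categorized(results: List[Tuple[str, str, bool]]) -> str:
--     """Format results organized by category."""
--     by_category = defaultdict(list)
--     for func_name, category, high_priority in results:
--         by_category[category].append((func_name, high_priority))
--
--     lines = []
--     lines.append("# Filtered UE4SS Functions for Archipelago Hooks")
--     lines.append("# Organized by category, high priority marked with [!]")
--     lines.append("")
--
--     # Define category order
--     category_order = [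
--         "BATTLE",
--         "ITEM_INVENTORY",
--         "EQUIPMENT_MATERIA",
--         "COLOSSEUM_VR",
--         "SHOP",
--         "QUEST_STORY",
--         "SAVE_LOAD",
--         "MINIGAME",
--         "PARTY_CHARACTER",
--         "MENU_UI",
--         "OTHER",
--     ]
--
--     for category in category_order:
--         if category not in by_category:
--             continue
--
--         funcs = sorted(by_category[category], key=lambda x: x[0])
--
--         lines.append("=" * 80)
--         lines.append(f"## {category.replace('_', ' ')}")
--         lines.append("=" * 80)
--         lines.append("")
--
--         for func_name, high_priority in funcs:
--             marker = "[!] " if high_priority else "    "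
--             lines.append(f"{marker}{func_name}")
--
--         lines.append("")
--
--     return "\n".join(lines)
-- ===== SOURCE B (Python) =====
-- CATEGORY_ORDER = [
--     "BATTLE",
--     "ITEM_INVENTORY",
--     "EQUIPMENT_MATERIA",
--     "COLOSSEUM_VR",
--     "SHOP",
--     "QUEST_STORY",
--     "SAVE_LOAD",
--     "MINIGAME",
--     "PARTY_CHARACTER",
--     "MENU_UI",
--     "OTHER",
-- ]
--
-- def _block(results, category):
--     """Lines for one category block, [] if the category has no members."""
--     members = [(fn, hp) for fn, cat, hp in results if cat == category]
--     if not members: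
--         return []
--     bar = "=" * 80
--     return ([bar, "## " + category.replace("_", " "), bar, ""]
--             + [("[!] " if hp else "    ") + fn
--                for fn, hp in sorted(members, key=lambda x: x[0])]
--             + [""])
--
-- def format_output_categorized(results):
--     """Format results organized by category (scan per category, no grouping dict)."""
--     header = ["# Filtered UE4SS Functions for Archipelago Hooks",
--               "# Organized by category, high priority marked with [!]",
--               ""]
--     return "\n".join(header + [line for c in CATEGORY_ORDER for line in _block(results, c)])
-- ===== Notes on version B (the rewrite author's own statement) =====
-- stated objective: alternative
-- what changed: Drops the defaultdict grouping pass: B scans the results list once per fixed category with a filtering comprehension (flatten of per-category blocks) instead of building a category index and looking it up.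
import Mathlib
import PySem

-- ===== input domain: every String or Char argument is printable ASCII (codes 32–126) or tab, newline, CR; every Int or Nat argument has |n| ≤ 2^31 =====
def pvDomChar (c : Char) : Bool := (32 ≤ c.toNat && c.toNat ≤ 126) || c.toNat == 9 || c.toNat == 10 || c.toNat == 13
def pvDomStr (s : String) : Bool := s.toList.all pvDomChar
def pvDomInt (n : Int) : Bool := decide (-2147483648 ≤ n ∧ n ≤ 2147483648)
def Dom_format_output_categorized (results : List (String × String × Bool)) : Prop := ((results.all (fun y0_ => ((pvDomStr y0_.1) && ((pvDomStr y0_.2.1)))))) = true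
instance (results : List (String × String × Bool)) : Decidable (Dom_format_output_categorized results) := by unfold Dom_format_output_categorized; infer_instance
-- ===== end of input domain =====

-- B replaces A's defaultdict grouping pass with a per-category filtering scan; alternative decomposition, same output.

-- ===== PORT A =====
def pvCatOrderA : List String :=
  ["BATTLE", "ITEM_INVENTORY", "EQUIPMENT_MATERIA", "COLOSSEUM_VR", "SHOP",
   "QUEST_STORY", "SAVE_LOAD", "MINIGAME", "PARTY_CHARACTER", "MENU_UI", "OTHER"]

def pvEq80A : String := String.mk (List.replicate 80 '=')  -- "=" * 80

-- for func_name, category, high_priority in results: by_category[category].append(...)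
def pvGroupA (results : List (String × String × Bool)) : PySem.Dict String (List (String × Bool)) :=
  results.foldl (fun d r => d.modify r.2.1 [] (· ++ [(r.1, r.2.2)])) PySem.Dict.empty

-- one iteration of A's 'for category in category_order' loop over the lines accumulator
def pvBlockA (d : PySem.Dict String (List (String × Bool))) (lines : List String)
    (cat : String) : List String :=
  if d.contains cat = false then lines
  else  -- funcs = sorted(by_category[category], key=lambda x: x[0]), inlined
    (((lines ++ [pvEq80A, "## " ++ PySem.Str.replace cat "_" " ", pvEq80A, ""]) ++
      (PySem.List.sorted (d.getD cat []) (fun x => x.1) false).map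
        (fun p => (if p.2 then "[!] " else "    ") ++ p.1)) ++ [""])

def format_output_categorized (results : List (String × String × Bool)) : String :=
  let by_category := pvGroupA results
  let lines : List String :=
    ["# Filtered UE4SS Functions for Archipelago Hooks",
     "# Organized by category, high priority marked with [!]", ""]
  let lines := pvCatOrderA.foldl (pvBlockA by_category) lines
  PySem.Str.join "\n" lines

-- ===== PORT B =====
def pvCatOrderB : List String :=
  ["BATTLE", "ITEM_INVENTORY", "EQUIPMENT_MATERIA", "COLOSSEUM_VR", "SHOP",
   "QUEST_STORY", "SAVE_LOAD", "MINIGAME", "PARTY_CHARACTER", "MENU_UI", "OTHER"]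

-- _block: lines for one category, [] if it has no members
def pvBlockB (results : List (String × String × Bool)) (category : String) : List String :=
  -- members = [(fn, hp) for fn, cat, hp in results if cat == category] (inlined below); bar = "=" * 80
  if (results.filterMap (fun r => if r.2.1 == category then some (r.1, r.2.2) else none)).isEmpty then []
  else
    ([String.mk (List.replicate 80 '='), "## " ++ PySem.Str.replace category "_" " ",
      String.mk (List.replicate 80 '='), ""] ++
      (PySem.List.sorted
        (results.filterMap (fun r => if r.2.1 == category then some (r.1, r.2.2) else none))
        (fun x => x.1) false).map
        (fun p => (if p.2 then "[!] " else "    ") ++ p.1) ++ [""])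

def format_output_categorized_alt (results : List (String × String × Bool)) : String :=
  let header : List String :=
    ["# Filtered UE4SS Functions for Archipelago Hooks",
     "# Organized by category, high priority marked with [!]", ""]
  PySem.Str.join "\n" (header ++ pvCatOrderB.flatMap (pvBlockB results))

-- ===== PRECONDITION & SPEC =====
def Spec_format_output_categorized (results : List (String × String × Bool)) (out : String) : Prop := out = format_output_categorized_alt results
instance (results : List (String × String × Bool)) (out : String) : Decidable (Spec_format_output_categorized results out) := by unfold Spec_format_output_categorized; infer_instance

-- ===== CLAIM (what is proved, stated in full; the proofs are below) =====
def Claim_equal_format_output_categorized : Prop := ∀ (results : List (String × String × Bool)), Dom_format_output_categorized results → Spec_format_output_categorized results (format_output_categorized results)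

-- ===== LEMMAS AND PROOFS =====

-- the grouping dict's entry for cat is exactly B's filtered member list
theorem pvGroupA_getD (results : List (String × String × Bool))
    (d : PySem.Dict String (List (String × Bool))) (cat : String) :
    (results.foldl (fun d r => d.modify r.2.1 [] (· ++ [(r.1, r.2.2)])) d).getD cat []
      = d.getD cat [] ++
        results.filterMap (fun r => if r.2.1 == cat then some (r.1, r.2.2) else none) := by
  induction results generalizing d with
  | nil => simp
  | cons r t ih =>
    simp only [List.foldl_cons, List.filterMap_cons, ih]
    by_cases h : r.2.1 = cat
    · simp [h, PySem.Dict.getD_modify_self]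
    · have hne : cat ≠ r.2.1 := fun hc => h hc.symm
      simp [PySem.Dict.getD_modify_of_ne _ _ _ hne, h]

theorem pvGroupA_contains (results : List (String × String × Bool))
    (d : PySem.Dict String (List (String × Bool))) (cat : String) :
    (results.foldl (fun d r => d.modify r.2.1 [] (· ++ [(r.1, r.2.2)])) d).contains cat
      = (d.contains cat || results.any (fun r => r.2.1 == cat)) := by
  induction results generalizing d with
  | nil => simp
  | cons r t ih =>
    simp only [List.foldl_cons, List.any_cons, ih, PySem.Dict.contains_modify]
    by_cases h : r.2.1 = cat
    · simp [h]
    · have h1 : (r.2.1 == cat) = false := by simp [h]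
      have h2 : (cat == r.2.1) = false := by simp; exact Ne.symm h
      simp [h1, h2]

-- members is empty iff no result has this category
theorem pvMembers_isEmpty (results : List (String × String × Bool)) (cat : String) :
    (results.filterMap (fun r => if r.2.1 == cat then some (r.1, r.2.2) else none)).isEmpty
      = !(results.any (fun r => r.2.1 == cat)) := by
  induction results with
  | nil => simp
  | cons r t ih =>
    by_cases h : r.2.1 = cat
    · simp [h]
    · simp [h, ih.symm]

-- one step of A's category loop equals appending B's block
theorem pvBlock_eq (results : List (String × String × Bool)) (c : String)
    (lines : List String) :
    pvBlockA (pvGroupA results) lines c = lines ++ pvBlockB results c := by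
  have hc : (pvGroupA results).contains c = results.any (fun r => r.2.1 == c) := by
    simpa using pvGroupA_contains results PySem.Dict.empty c
  have hget : (pvGroupA results).getD c []
      = results.filterMap (fun r => if r.2.1 == c then some (r.1, r.2.2) else none) := by
    simpa using pvGroupA_getD results PySem.Dict.empty c
  unfold pvBlockA pvBlockB
  rw [hc, hget, pvMembers_isEmpty]
  by_cases h : results.any (fun r => r.2.1 == c) = true
  · simp [h, pvEq80A]
  · simp [h]

-- A's category loop appends exactly B's flattened blocks
theorem pvLoop_eq (results : List (String × String × Bool)) (cats : List String)
    (lines : List String) :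
    cats.foldl (pvBlockA (pvGroupA results)) lines
      = lines ++ cats.flatMap (pvBlockB results) := by
  induction cats generalizing lines with
  | nil => simp
  | cons c t ih =>
    simp only [List.foldl_cons, List.flatMap_cons, pvBlock_eq, ih, List.append_assoc]

-- ===== VERDICT (by name: the statement is the Claim_ definition above) =====
theorem format_output_categorized_spec : Claim_equal_format_output_categorized := by
  intro results _
  unfold Spec_format_output_categorized format_output_categorized format_output_categorized_alt
  have h := pvLoop_eq results pvCatOrderA
    ["# Filtered UE4SS Functions for Archipelago Hooks",
     "# Organized by category, high priority marked with [!]", ""]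
  simp only [h]
  rfl
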